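-- pv_equiv track=rewrite | github.com/facebookresearch/DepthLM_Official | utils/datasets.py | adjust_index
-- ===== SOURCE A (Python) =====
-- def adjust_index(
--     index,
--     pixel_coords,
-- ):
--     # Check if the current index is valid
--     if pixel_coords[index] != [-1, -1]:
--         return index
--
--     # Search for the closest valid index
--     left = index - 1
--     right = index + 1
--     n = len(pixel_coords)
--
--     while left >= 0 or right < n:
--         if left >= 0 and pixel_coords[left] != [-1, -1]:
--             return left
--         if right < n and pixel_coords[right] != [-1, -1]:
--             return right
--         left -= 1
--         right += 1
--
--     # If no valid index is found, return -1
--     return -1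
-- ===== SOURCE B (Python) =====
-- def adjust_index(
--     index,
--     pixel_coords,
-- ):
--     # If the entry at the requested position is valid, keep the index as-is
--     if pixel_coords[index] != [-1, -1]:
--         return index
--
--     # Single linear scan: keep the valid position closest to index
--     # (strict '<' with ascending i keeps the smaller index on ties,
--     # i.e. the left neighbour is preferred, like an outward search).
--     best_i = -1
--     best_d = None
--     for i, c in enumerate(pixel_coords):
--         if c != [-1, -1]:
--             d = abs(i - index)
--             if best_d is None or d < best_d:
--                 best_i = i
--                 best_d = d
--     return best_i
-- ===== Notes on version B (the rewrite author's own statement) =====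
-- stated objective: simpler
-- what changed: Replaces A's outward two-pointer while-loop with a single linear scan over enumerate(pixel_coords) keeping the valid index with the smallest |i - index| (strict update preserves the left-on-tie preference).
-- intended difference: For a negative in-range index whose wrapped entry is [-1,-1] and with some valid entry strictly after the wrapped position, A's right pointer wraps around via Python negative indexing and returns a negative raw offset (e.g. -2) that is not a valid list position, while B returns the non-negative nearest valid index, which is the intended result. — e.g. on adjust_index(-3, [[-1, -1], [-1, -1], [-1, -1], [9, 9], [-1, -1]]): A returns -2, B returns 3
import Mathlib
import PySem

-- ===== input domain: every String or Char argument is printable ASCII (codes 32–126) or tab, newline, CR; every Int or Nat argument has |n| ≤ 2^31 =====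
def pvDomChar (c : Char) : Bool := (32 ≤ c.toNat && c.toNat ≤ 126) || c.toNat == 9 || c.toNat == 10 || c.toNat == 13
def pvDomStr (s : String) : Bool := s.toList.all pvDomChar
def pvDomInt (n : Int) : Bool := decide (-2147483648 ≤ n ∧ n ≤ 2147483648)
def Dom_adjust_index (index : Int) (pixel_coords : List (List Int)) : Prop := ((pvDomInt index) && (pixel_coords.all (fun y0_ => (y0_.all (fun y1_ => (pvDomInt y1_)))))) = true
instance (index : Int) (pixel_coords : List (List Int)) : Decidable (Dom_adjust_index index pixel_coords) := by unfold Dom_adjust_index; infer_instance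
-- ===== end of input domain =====

-- B replaces A's outward two-pointer while-loop by one linear scan keeping the nearest valid index (simpler);
-- on negative in-range indices with an invalid wrapped entry A's raw/wrapped pointer mix is stated as an intended difference (D_).

-- ===== PORT A =====
-- the while-loop of A: expand left/right until a valid entry is found or both pointers are out of range
-- fuel = (left + 1).toNat + (n - right).toNat bounds the number of iterations exactly:
-- when it is 0 the loop condition is already false, so the fuel-0 branch is Python's fall-through return -1
def pvALoop (pixel_coords : List (List Int)) (n : Int) : Nat → Int → Int → Int
  | 0, _, _ => -1
  | fuel + 1, left, right =>
    if left ≥ 0 ∨ right < n then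
      if left ≥ 0 ∧ PySem.List.pyGet? pixel_coords left ≠ some [-1, -1] then left
      else if right < n ∧ PySem.List.pyGet? pixel_coords right ≠ some [-1, -1] then right
      else pvALoop pixel_coords n fuel (left - 1) (right + 1)
    else -1

def adjust_index (index : Int) (pixel_coords : List (List Int)) : Int :=
  match PySem.List.pyGet? pixel_coords index with
  | none => 0  -- unreachable under Pre_ (Python raises IndexError here)
  | some c =>
    if c ≠ [-1, -1] then index
    else pvALoop pixel_coords (pixel_coords.length : Int)
      (((index - 1) + 1).toNat + ((pixel_coords.length : Int) - (index + 1)).toNat)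
      (index - 1) (index + 1)

-- ===== PORT B =====
-- the for-loop of B: fold over enumerate with state (best_i, best_d)
def pvBStep (index : Int) (acc : Int × Option Int) (p : Int × List Int) : Int × Option Int :=
  if p.2 ≠ [-1, -1] then
    let d := |p.1 - index|
    match acc.2 with
    | none => (p.1, some d)
    | some bd => if d < bd then (p.1, some d) else acc
  else acc

def adjust_index_alt (index : Int) (pixel_coords : List (List Int)) : Int :=
  match PySem.List.pyGet? pixel_coords index with
  | none => 0  -- unreachable under Pre_ (Python raises IndexError here)
  | some c =>
    if c ≠ [-1, -1] then index
    else ((PySem.List.enumerate pixel_coords 0).foldl (pvBStep index) (-1, none)).1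

-- ===== PRECONDITION & SPEC =====
-- Pre_ excludes exactly the inputs on which A raises IndexError (index outside Python's range)
def Pre_adjust_index (index : Int) (pixel_coords : List (List Int)) : Prop :=
  -(pixel_coords.length : Int) ≤ index ∧ index < (pixel_coords.length : Int)
instance (index : Int) (pixel_coords : List (List Int)) : Decidable (Pre_adjust_index index pixel_coords) := by
  unfold Pre_adjust_index; infer_instance

def pvWitness_adjust_index : Int × List (List Int) := (1, [[-1, -1], [3, 4], [-1, -1]])

-- On a negative in-range index whose wrapped entry is [-1,-1] and with some valid entry strictly after the
-- wrapped position, A's right pointer wraps via Python negative indexing and A returns a negative raw pointer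
-- value (not a valid list position), while B returns the non-negative nearest valid index, the intended value.
def D_adjust_index (index : Int) (pixel_coords : List (List Int)) : Prop :=
  index < 0 ∧ PySem.List.pyGet? pixel_coords index = some [-1, -1] ∧
  ∃ y ∈ pixel_coords.drop ((index + pixel_coords.length).toNat + 1), y ≠ [-1, -1]
instance (index : Int) (pixel_coords : List (List Int)) : Decidable (D_adjust_index index pixel_coords) := by
  unfold D_adjust_index; infer_instance

def Spec_adjust_index (index : Int) (pixel_coords : List (List Int)) (out : Int) : Prop :=
  ¬ D_adjust_index index pixel_coords → out = adjust_index_alt index pixel_coords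
instance (index : Int) (pixel_coords : List (List Int)) (out : Int) : Decidable (Spec_adjust_index index pixel_coords out) := by
  unfold Spec_adjust_index; infer_instance

def pvDiffWitness_adjust_index : Int × List (List Int) :=
  (-3, [[-1, -1], [-1, -1], [-1, -1], [9, 9], [-1, -1]])
def pvDiffWitnessOut_adjust_index : Int × Int := (-2, 3)

-- ===== CLAIM (what is proved, stated in full; the proofs are below) =====
def Claim_unchanged_adjust_index : Prop := ∀ (index : Int) (pixel_coords : List (List Int)), Dom_adjust_index index pixel_coords → Pre_adjust_index index pixel_coords → Spec_adjust_index index pixel_coords (adjust_index index pixel_coords)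
def Claim_changed_adjust_index : Prop := Dom_adjust_index (pvDiffWitness_adjust_index.1) (pvDiffWitness_adjust_index.2) ∧ Pre_adjust_index (pvDiffWitness_adjust_index.1) (pvDiffWitness_adjust_index.2) ∧ D_adjust_index (pvDiffWitness_adjust_index.1) (pvDiffWitness_adjust_index.2) ∧ adjust_index (pvDiffWitness_adjust_index.1) (pvDiffWitness_adjust_index.2) = pvDiffWitnessOut_adjust_index.1 ∧ adjust_index_alt (pvDiffWitness_adjust_index.1) (pvDiffWitness_adjust_index.2) = pvDiffWitnessOut_adjust_index.2 ∧ pvDiffWitnessOut_adjust_index.1 ≠ pvDiffWitnessOut_adjust_index.2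
def Claim_exact_adjust_index : Prop := ∀ (index : Int) (pixel_coords : List (List Int)), Dom_adjust_index index pixel_coords → Pre_adjust_index index pixel_coords → D_adjust_index index pixel_coords → adjust_index index pixel_coords ≠ adjust_index_alt index pixel_coords

-- ===== LEMMAS AND PROOFS =====

-- a position i is "valid": in range and its entry is not [-1,-1]
def pvV (pixel_coords : List (List Int)) (i : Nat) : Prop :=
  i < pixel_coords.length ∧ pixel_coords.getD i [] ≠ [-1, -1]

-- a valid entry in a suffix is a valid position past its start
theorem pvDrop_iff (pixel_coords : List (List Int)) (k : Nat) :
    (∃ y ∈ pixel_coords.drop k, y ≠ [-1, -1]) ↔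
      ∃ p : Nat, k ≤ p ∧ p < pixel_coords.length ∧ pixel_coords.getD p [] ≠ [-1, -1] := by
  constructor
  · rintro ⟨y, hy, hne⟩
    obtain ⟨j, hj, rfl⟩ := List.mem_iff_getElem.mp hy
    have hjl : k + j < pixel_coords.length := by
      have := hj; simp [List.length_drop] at this; omega
    refine ⟨k + j, by omega, hjl, ?_⟩
    rw [List.getD_eq_getElem?_getD, List.getElem?_eq_getElem hjl]
    simpa [List.getElem_drop] using hne
  · rintro ⟨p, hkp, hpl, hne⟩
    have hjl : p - k < (pixel_coords.drop k).length := by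
      simp [List.length_drop]; omega
    refine ⟨(pixel_coords.drop k)[p - k], List.getElem_mem _, ?_⟩
    rw [List.getD_eq_getElem?_getD, List.getElem?_eq_getElem hpl] at hne
    simpa [List.getElem_drop, show k + (p - k) = p by omega] using hne

-- characterization of B's fold: either no valid position (result (-1, none)), or the result is
-- the valid position lexicographically minimizing (|i - index|, i)
theorem pvBScan_spec (index : Int) (pixel_coords : List (List Int)) :
    ((PySem.List.enumerate pixel_coords 0).foldl (pvBStep index) (-1, none) = (-1, none) ∧
      ∀ i, ¬ pvV pixel_coords i)
    ∨ (∃ i : Nat, pvV pixel_coords i ∧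
        (PySem.List.enumerate pixel_coords 0).foldl (pvBStep index) (-1, none) =
          ((i : Int), some (|(i : Int) - index|)) ∧
        ∀ j, pvV pixel_coords j →
          (|(i : Int) - index| < |(j : Int) - index| ∨
            (|(i : Int) - index| = |(j : Int) - index| ∧ i ≤ j))) := by
  induction pixel_coords using List.reverseRecOn with
  | nil =>
    left
    constructor
    · simp [PySem.List.enumerate_nil]
    · intro i hi; exact absurd hi.1 (by simp)
  | append_singleton xs x ih =>
    have henum : PySem.List.enumerate (xs ++ [x]) 0 =
        PySem.List.enumerate xs 0 ++ [((xs.length : Int), x)] := by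
      simp [PySem.List.enumerate_append, PySem.List.enumerate_cons, PySem.List.enumerate_nil]
    rw [henum, List.foldl_append]
    have hVlt : ∀ j : Nat, j < xs.length → (pvV (xs ++ [x]) j ↔ pvV xs j) := by
      intro j hj
      unfold pvV
      rw [List.getD_append xs [x] [] j hj]
      constructor
      · rintro ⟨_, h2⟩; exact ⟨hj, h2⟩
      · rintro ⟨_, h2⟩; exact ⟨by simp; omega, h2⟩
    have hVlast : pvV (xs ++ [x]) xs.length ↔ x ≠ [-1, -1] := by
      unfold pvV
      simp [List.getD]
    have hVsplit : ∀ j : Nat, pvV (xs ++ [x]) j → j < xs.length ∨ j = xs.length := by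
      intro j hj
      have := hj.1
      simp at this
      omega
    rcases ih with ⟨heq, hnone⟩ | ⟨i, hVi, heq, hmin⟩
    · rw [heq]
      by_cases hx : x = [-1, -1]
      · left
        constructor
        · simp [pvBStep, hx]
        · intro j hj
          rcases hVsplit j hj with h | h
          · exact hnone j ((hVlt j h).mp hj)
          · exact (hVlast.mp (h ▸ hj)) hx
      · right
        refine ⟨xs.length, hVlast.mpr hx, ?_, ?_⟩
        · simp [pvBStep, hx]
        · intro j hj
          rcases hVsplit j hj with h | h
          · exact absurd ((hVlt j h).mp hj) (hnone j)
          · right; simp [h]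
    · rw [heq]
      by_cases hx : x = [-1, -1]
      · right
        refine ⟨i, (hVlt i hVi.1).mpr hVi, by simp [pvBStep, hx], ?_⟩
        intro j hj
        rcases hVsplit j hj with h | h
        · exact hmin j ((hVlt j h).mp hj)
        · exact absurd (hVlast.mp (h ▸ hj)) (by simp [hx])
      · by_cases hlt : |(xs.length : Int) - index| < |(i : Int) - index|
        · right
          refine ⟨xs.length, hVlast.mpr hx, ?_, ?_⟩
          · simp [pvBStep, hx, hlt]
          · intro j hj
            rcases hVsplit j hj with h | h
            · rcases hmin j ((hVlt j h).mp hj) with h2 | ⟨h2, _⟩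
              · exact Or.inl (lt_trans hlt h2)
              · exact Or.inl (h2 ▸ hlt)
            · right; simp [h]
        · right
          refine ⟨i, (hVlt i hVi.1).mpr hVi, ?_, ?_⟩
          · simp [pvBStep, hx, hlt]
          · intro j hj
            rcases hVsplit j hj with h | h
            · exact hmin j ((hVlt j h).mp hj)
            · subst h
              rcases lt_or_ge i xs.length with h2 | h2
              · rcases lt_or_eq_of_le (not_lt.mp hlt) with h3 | h3
                · exact Or.inl h3
                · exact Or.inr ⟨h3, le_of_lt h2⟩
              · exact absurd hVi.1 (by omega)

-- bridge: the loop's membership test at a non-negative in-range position is validity of that position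
theorem pvV_iff_pyGet (pixel_coords : List (List Int)) (t : Int) (h0 : 0 ≤ t)
    (hn : t < (pixel_coords.length : Int)) :
    (PySem.List.pyGet? pixel_coords t ≠ some [-1, -1]) ↔ pvV pixel_coords t.toNat := by
  have ht : t.toNat < pixel_coords.length := by omega
  rw [PySem.List.pyGet?_of_nonneg _ h0]
  simp [pvV, ht, List.getD_eq_getElem?_getD]

-- bridge: at a negative in-range index Python wraps, pyGet? reads position t + len
theorem pvGet_neg_eq (pixel_coords : List (List Int)) (t : Int)
    (h1 : -(pixel_coords.length : Int) ≤ t) (h2 : t < 0) :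
    PySem.List.pyGet? pixel_coords t =
      some (pixel_coords.getD (t + pixel_coords.length).toNat []) := by
  have hk0 : 0 < (-t).toNat := by omega
  have hkl : (-t).toNat ≤ pixel_coords.length := by omega
  have ht : t = -(((-t).toNat : Nat) : Int) := by omega
  have hlt : pixel_coords.length - (-t).toNat < pixel_coords.length := by omega
  rw [ht, PySem.List.pyGet?_neg_natCast pixel_coords ((-t).toNat) hk0 hkl,
    List.getD_eq_getElem?_getD,
    show ((-(((-t).toNat : Nat) : Int)) + (pixel_coords.length : Int)).toNat =
        pixel_coords.length - (-t).toNat from by omega,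
    List.getElem?_eq_getElem hlt]
  rfl

-- A's loop equals B's scan in the symmetric (0 ≤ index) case: under the invariant that all valid
-- positions lie outside the open interval (l, r), a valid endpoint is the lexicographic minimum
theorem pvALoop_spec_aux (pixel_coords : List (List Int)) (index : Int)
    (hin : 0 ≤ index) (hiln : index < (pixel_coords.length : Int)) :
    ∀ (fuel : Nat) (l r : Int),
      (l + 1).toNat + ((pixel_coords.length : Int) - r).toNat ≤ fuel →
      l + r = 2 * index → l < index →
      (∀ i : Nat, pvV pixel_coords i → ((i : Int) ≤ l ∨ r ≤ (i : Int))) →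
      pvALoop pixel_coords (pixel_coords.length : Int) fuel l r =
        ((PySem.List.enumerate pixel_coords 0).foldl (pvBStep index) (-1, none)).1 := by
  intro fuel
  induction fuel with
  | zero =>
    intro l r hfuel hlr hl hinv
    have hnov : ∀ i, ¬ pvV pixel_coords i := by
      intro i hV
      rcases hinv i hV with h | h
      · omega
      · have := hV.1; omega
    rcases pvBScan_spec index pixel_coords with ⟨heq, _⟩ | ⟨i, hVi, _, _⟩
    · rw [heq]; rfl
    · exact absurd hVi (hnov i)
  | succ fuel ih =>
    intro l r hfuel hlr hl hinv
    rw [pvALoop]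
    by_cases hcond : l ≥ 0 ∨ r < (pixel_coords.length : Int)
    · have hrpos : index < r := by omega
      by_cases hL : l ≥ 0 ∧ PySem.List.pyGet? pixel_coords l ≠ some [-1, -1]
      · rw [if_pos hcond, if_pos hL]
        have hVl : pvV pixel_coords l.toNat := (pvV_iff_pyGet _ l hL.1 (by omega)).mp hL.2
        have hminl : ∀ j, pvV pixel_coords j →
            (|(l.toNat : Int) - index| < |(j : Int) - index| ∨
              (|(l.toNat : Int) - index| = |(j : Int) - index| ∧ l.toNat ≤ j)) := by
          intro j hVj
          have hcast : (l.toNat : Int) = l := by omega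
          rw [hcast]
          have habsl : |l - index| = index - l := by rw [abs_of_nonpos (by omega)]; ring
          rcases hinv j hVj with h | h
          · have habsj : |(j : Int) - index| = index - (j : Int) := by
              rw [abs_of_nonpos (by omega)]; ring
            rw [habsl, habsj]; omega
          · have habsj : |(j : Int) - index| = (j : Int) - index := by
              rw [abs_of_nonneg (by omega)]
            rw [habsl, habsj]; omega
        rcases pvBScan_spec index pixel_coords with ⟨_, hnov⟩ | ⟨i, hVi, heq, hmin⟩
        · exact absurd hVl (hnov _)
        · rw [heq]
          have h1 := hmin _ hVl
          have h2 := hminl _ hVi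
          dsimp only
          omega
      · by_cases hR : r < (pixel_coords.length : Int) ∧
            PySem.List.pyGet? pixel_coords r ≠ some [-1, -1]
        · rw [if_pos hcond, if_neg hL, if_pos hR]
          have hVr : pvV pixel_coords r.toNat := (pvV_iff_pyGet _ r (by omega) hR.1).mp hR.2
          have hnotl : ∀ hl0 : l ≥ 0, ¬ pvV pixel_coords l.toNat := by
            intro hl0 hV
            exact hL ⟨hl0, (pvV_iff_pyGet _ l hl0 (by omega)).mpr hV⟩
          have hminr : ∀ j, pvV pixel_coords j →
              (|(r.toNat : Int) - index| < |(j : Int) - index| ∨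
                (|(r.toNat : Int) - index| = |(j : Int) - index| ∧ r.toNat ≤ j)) := by
            intro j hVj
            have hcast : (r.toNat : Int) = r := by omega
            rw [hcast]
            have habsr : |r - index| = r - index := by rw [abs_of_nonneg (by omega)]
            rcases hinv j hVj with h | h
            · have hjl : (j : Int) < l := by
                rcases lt_or_eq_of_le h with h2 | h2
                · exact h2
                · exfalso
                  have hl0 : l ≥ 0 := by omega
                  have : (j : Nat) = l.toNat := by omega
                  exact hnotl hl0 (this ▸ hVj)
              have habsj : |(j : Int) - index| = index - (j : Int) := by
                rw [abs_of_nonpos (by omega)]; ring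
              rw [habsr, habsj]; omega
            · have habsj : |(j : Int) - index| = (j : Int) - index := by
                rw [abs_of_nonneg (by omega)]
              rw [habsr, habsj]; omega
          rcases pvBScan_spec index pixel_coords with ⟨_, hnov⟩ | ⟨i, hVi, heq, hmin⟩
          · exact absurd hVr (hnov _)
          · rw [heq]
            have h1 := hmin _ hVr
            have h2 := hminr _ hVi
            dsimp only
            omega
        · rw [if_pos hcond, if_neg hL, if_neg hR]
          apply ih (l - 1) (r + 1) (by omega) (by omega) (by omega)
          intro j hVj
          rcases hinv j hVj with h | h
          · left
            rcases lt_or_eq_of_le h with h2 | h2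
            · omega
            · exfalso
              have hl0 : l ≥ 0 := by omega
              have hje : (j : Nat) = l.toNat := by omega
              have : PySem.List.pyGet? pixel_coords l = some [-1, -1] := by
                by_contra hc
                exact hL ⟨hl0, hc⟩
              exact ((pvV_iff_pyGet _ l hl0 (by omega)).mpr (hje ▸ hVj)) this
          · right
            rcases lt_or_eq_of_le h with h2 | h2
            · omega
            · exfalso
              have hrn : r < (pixel_coords.length : Int) := by
                have := hVj.1; omega
              have : PySem.List.pyGet? pixel_coords r = some [-1, -1] := by
                by_contra hc
                exact hR ⟨hrn, hc⟩
              have hje : (j : Nat) = r.toNat := by omega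
              exact ((pvV_iff_pyGet _ r (by omega) hrn).mpr (hje ▸ hVj)) this
    · rw [if_neg hcond]
      rcases pvBScan_spec index pixel_coords with ⟨heq, _⟩ | ⟨i, hVi, _, _⟩
      · rw [heq]
      · exfalso
        rcases hinv i hVi with h | h
        · omega
        · have := hVi.1; omega

-- A's loop equals B's scan in the negative-index case outside D_: the left pointer never fires,
-- wrapped right accesses hit invalid entries, so the scan finds the least valid position
theorem pvALoopNeg_spec (pixel_coords : List (List Int)) (index : Int)
    (hneg : index < 0) (hIn : -(pixel_coords.length : Int) ≤ index)
    (htail : ∀ p : Nat, (pixel_coords.length : Int) + index ≤ (p : Int) → ¬ pvV pixel_coords p) :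
    ∀ (fuel : Nat) (l r : Int),
      (l + 1).toNat + ((pixel_coords.length : Int) - r).toNat ≤ fuel →
      l < 0 → index + 1 ≤ r → r ≤ (pixel_coords.length : Int) →
      (∀ p : Nat, (p : Int) < r → ¬ pvV pixel_coords p) →
      pvALoop pixel_coords (pixel_coords.length : Int) fuel l r =
        ((PySem.List.enumerate pixel_coords 0).foldl (pvBStep index) (-1, none)).1 := by
  intro fuel
  induction fuel with
  | zero =>
    intro l r hfuel hl hr1 hrn hbelow
    rcases pvBScan_spec index pixel_coords with ⟨heq, _⟩ | ⟨i, hVi, _, _⟩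
    · rw [heq]; rfl
    · exact absurd hVi (hbelow i (by have := hVi.1; omega))
  | succ fuel ih =>
    intro l r hfuel hl hr1 hrn hbelow
    rw [pvALoop]
    by_cases hcond : l ≥ 0 ∨ r < (pixel_coords.length : Int)
    · have hrltn : r < (pixel_coords.length : Int) := by omega
      have hL : ¬ (l ≥ 0 ∧ PySem.List.pyGet? pixel_coords l ≠ some [-1, -1]) := by
        intro h; omega
      by_cases hR : r < (pixel_coords.length : Int) ∧
          PySem.List.pyGet? pixel_coords r ≠ some [-1, -1]
      · rw [if_pos hcond, if_neg hL, if_pos hR]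
        have hr0 : 0 ≤ r := by
          by_contra hc
          have hrneg : r < 0 := by omega
          have hw := pvGet_neg_eq pixel_coords r (by omega) hrneg
          have hpos : ¬ pvV pixel_coords (r + pixel_coords.length).toNat :=
            htail _ (by omega)
          unfold pvV at hpos
          push_neg at hpos
          exact hR.2 (by rw [hw, hpos (by omega)])
        have hVr : pvV pixel_coords r.toNat := (pvV_iff_pyGet _ r hr0 hrltn).mp hR.2
        rcases pvBScan_spec index pixel_coords with ⟨_, hnov⟩ | ⟨i, hVi, heq, hmin⟩
        · exact absurd hVr (hnov _)
        · rw [heq]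
          have hige : ¬ ((i : Int) < r) := fun hc => (hbelow i hc) hVi
          have habsr : |(r.toNat : Int) - index| = r - index := by
            rw [abs_of_nonneg (by omega)]; omega
          have habsi : |(i : Int) - index| = (i : Int) - index := by
            rw [abs_of_nonneg (by omega)]
          have h1 := hmin _ hVr
          rw [habsr, habsi] at h1
          dsimp only
          omega
      · rw [if_pos hcond, if_neg hL, if_neg hR]
        apply ih (l - 1) (r + 1) (by omega) (by omega) (by omega) (by omega)
        intro p hp
        rcases lt_or_ge (p : Int) r with h | h
        · exact hbelow p h
        · have hpe : (p : Int) = r := by omega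
          have hr0 : 0 ≤ r := by omega
          intro hV
          have : PySem.List.pyGet? pixel_coords r = some [-1, -1] := by
            by_contra hc
            exact hR ⟨hrltn, hc⟩
          have hne := (pvV_iff_pyGet _ r hr0 hrltn).mpr (by rwa [show r.toNat = p by omega])
          exact hne this
    · rw [if_neg hcond]
      rcases pvBScan_spec index pixel_coords with ⟨heq, _⟩ | ⟨i, hVi, _, _⟩
      · rw [heq]
      · exact absurd hVi (hbelow i (by have := hVi.1; omega))

-- inside D_: while the right pointer is still negative a valid wrapped entry exists ahead,
-- so A's loop returns a negative raw pointer value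
theorem pvALoopNeg_neg (pixel_coords : List (List Int)) :
    ∀ (fuel : Nat) (l r : Int),
      (l + 1).toNat + ((pixel_coords.length : Int) - r).toNat ≤ fuel →
      l < 0 → r < 0 → -(pixel_coords.length : Int) ≤ r →
      (∃ p : Nat, p < pixel_coords.length ∧ (pixel_coords.length : Int) + r ≤ (p : Int) ∧
        pvV pixel_coords p) →
      pvALoop pixel_coords (pixel_coords.length : Int) fuel l r < 0 := by
  intro fuel
  induction fuel with
  | zero =>
    intro l r hfuel hl hr hrn hex
    exfalso
    obtain ⟨p, hp, _, _⟩ := hex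
    omega
  | succ fuel ih =>
    intro l r hfuel hl hr hrn hex
    obtain ⟨p, hpn, hpr, hVp⟩ := hex
    have hn0 : 0 < pixel_coords.length := by omega
    rw [pvALoop, if_pos (by omega)]
    rw [if_neg (by intro h; omega)]
    by_cases hR : r < (pixel_coords.length : Int) ∧
        PySem.List.pyGet? pixel_coords r ≠ some [-1, -1]
    · rw [if_pos hR]; omega
    · rw [if_neg hR]
      have hget : PySem.List.pyGet? pixel_coords r = some [-1, -1] := by
        by_contra hc
        exact hR ⟨by omega, hc⟩
      rw [pvGet_neg_eq pixel_coords r hrn hr] at hget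
      have hnotr : ¬ pvV pixel_coords (r + pixel_coords.length).toNat := by
        intro hV
        exact hV.2 (by injection hget)
      have hpne : (p : Int) ≠ (pixel_coords.length : Int) + r := by
        intro hc
        exact hnotr (by rwa [show (r + pixel_coords.length).toNat = p by omega])
      apply ih (l - 1) (r + 1) (by omega) (by omega) (by omega) (by omega)
      exact ⟨p, hpn, by omega, hVp⟩

-- ===== VERDICT (by name: the statement is the Claim_ definition above) =====
theorem adjust_index_spec : Claim_unchanged_adjust_index := by
  intro index pixel_coords _ hPre
  obtain ⟨h1, h2⟩ := hPre
  unfold Spec_adjust_index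
  intro hD
  unfold adjust_index adjust_index_alt
  rcases hc : PySem.List.pyGet? pixel_coords index with _ | c
  · exfalso
    by_cases hix : 0 ≤ index
    · rw [PySem.List.pyGet?_of_nonneg _ hix,
        List.getElem?_eq_getElem (show index.toNat < pixel_coords.length by omega)] at hc
      simp at hc
    · rw [pvGet_neg_eq pixel_coords index h1 (by omega)] at hc
      simp at hc
  · by_cases hcI : c = [-1, -1]
    · simp only [hcI, ne_eq, not_true_eq_false, if_false]
      by_cases hix : 0 ≤ index
      · have hnotid : ¬ pvV pixel_coords index.toNat := by
          intro hV
          exact ((pvV_iff_pyGet _ index hix h2).mpr hV) (by rw [hc, hcI])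
        apply pvALoop_spec_aux pixel_coords index hix h2
          (((index - 1) + 1).toNat + ((pixel_coords.length : Int) - (index + 1)).toNat)
          (index - 1) (index + 1) le_rfl (by ring) (by omega)
        intro j hVj
        have hjne : (j : Nat) ≠ index.toNat := fun hje => hnotid (hje ▸ hVj)
        omega
      · have hneg : index < 0 := by omega
        have hgetD : pixel_coords.getD (index + pixel_coords.length).toNat [] = [-1, -1] := by
          have hw := pvGet_neg_eq pixel_coords index h1 hneg
          rw [hc] at hw
          injection hw with hw'
          rw [← hw', hcI]
        have hnoex : ¬ ∃ y ∈ pixel_coords.drop ((index + pixel_coords.length).toNat + 1),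
            y ≠ [-1, -1] := fun hex => hD ⟨hneg, by rw [hc, hcI], hex⟩
        rw [pvDrop_iff] at hnoex
        push_neg at hnoex
        have htail : ∀ p : Nat, (pixel_coords.length : Int) + index ≤ (p : Int) →
            ¬ pvV pixel_coords p := by
          intro p hpge hV
          have hplen := hV.1
          rcases eq_or_lt_of_le hpge with he | hlt
          · exact hV.2 (by rwa [show p = (index + pixel_coords.length).toNat by omega])
          · exact hV.2 (hnoex p (by omega) hplen)
        apply pvALoopNeg_spec pixel_coords index hneg h1 htail
          (((index - 1) + 1).toNat + ((pixel_coords.length : Int) - (index + 1)).toNat)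
          (index - 1) (index + 1) le_rfl (by omega) le_rfl (by omega)
        intro p hp hV
        omega
    · simp only [hcI, ne_eq, not_false_eq_true, if_true]

theorem adjust_index_changed : Claim_changed_adjust_index := by
  unfold Claim_changed_adjust_index
  refine ⟨by decide, by decide, by decide, ?_, by decide, by decide⟩
  show adjust_index (-3) [[-1, -1], [-1, -1], [-1, -1], [9, 9], [-1, -1]] = -2
  simp [adjust_index, pvALoop, PySem.List.pyGet?, PySem.List.pyIdx?]

theorem adjust_index_tight : Claim_exact_adjust_index := by
  intro index pixel_coords _ hPre hD
  obtain ⟨hneg, hget, hex⟩ := hD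
  obtain ⟨hIn, hlen⟩ := hPre
  obtain ⟨p, hkp, hplen, hpI⟩ := (pvDrop_iff _ _).mp hex
  have hidx2 : index < -1 := by omega
  have hA : adjust_index index pixel_coords =
      pvALoop pixel_coords (pixel_coords.length : Int)
        (((index - 1) + 1).toNat + ((pixel_coords.length : Int) - (index + 1)).toNat)
        (index - 1) (index + 1) := by
    unfold adjust_index
    rw [hget]
    simp
  have hB : adjust_index_alt index pixel_coords =
      ((PySem.List.enumerate pixel_coords 0).foldl (pvBStep index) (-1, none)).1 := by
    unfold adjust_index_alt
    rw [hget]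
    simp
  have hAneg : adjust_index index pixel_coords < 0 := by
    rw [hA]
    apply pvALoopNeg_neg pixel_coords
      (((index - 1) + 1).toNat + ((pixel_coords.length : Int) - (index + 1)).toNat)
      (index - 1) (index + 1) le_rfl (by omega) (by omega) (by omega)
    exact ⟨p, hplen, by omega, ⟨hplen, hpI⟩⟩
  have hBpos : 0 ≤ adjust_index_alt index pixel_coords := by
    rw [hB]
    rcases pvBScan_spec index pixel_coords with ⟨_, hnov⟩ | ⟨i, _, heq, _⟩
    · exact absurd ⟨hplen, hpI⟩ (hnov p)
    · rw [heq]; dsimp only; omega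
  omega
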